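-- pv_equiv track=rewrite | github.com/tier4/autoware_universe | planning/autoware_naive_tf_planner/autoware_naive_tf_planner/main.py | identify_current_light_status
-- ===== SOURCE A (Python) =====
-- def identify_current_light_status(
--     turn_direction: int, traffic_light_elements: list
-- ) -> int:
--     """
--     Identify the current traffic light status based on turn direction and traffic light elements.
--
--     Args:
--         turn_direction: Integer representing the turn direction (0=straight, 1=left, 2=right)
--         traffic_light_elements: List of dictionaries containing traffic light information
--                                (color, shape, status, confidence)
--
--     Returns:
--         int: The color of the relevant traffic light (0=UNKNOWN, 1=RED, 2=AMBER, 3=GREEN, 4=WHITE)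
--     """
--     # Filter out ineffective elements (color == 0)
--     effective_elements = [
--         element for element in traffic_light_elements if element["color"] != 0
--     ]
--
--     # If no effective elements, return UNKNOWN (0)
--     if not effective_elements:
--         return 0
--
--     # If only one effective element, return its color
--     if len(effective_elements) == 1:
--         return effective_elements[0]["color"]
--
--     # For multiple elements, find the one that matches the turn direction
--     # Map turn direction to corresponding arrow shape
--     direction_to_shape_map = {
--         0: 4,  # straight -> UP_ARROW
--         1: 2,  # left -> LEFT_ARROW
--         2: 3,  # right -> RIGHT_ARROW
--     }
--
--     target_shape = direction_to_shape_map.get(turn_direction, 0)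
--
--     # First priority: Find elements with exactly matching direction
--     matching_elements = [
--         element for element in effective_elements if element["shape"] == target_shape
--     ]
--     if matching_elements:
--         # If multiple matching elements, take the one with highest confidence
--         return max(matching_elements, key=lambda x: x["confidence"])["color"]
--
--     # Second priority: Find circle elements
--     circle_elements = [
--         element for element in effective_elements if element["shape"] == 1
--     ]  # CIRCLE
--     if circle_elements:
--         # If multiple circle elements, take the one with highest confidence
--         return max(circle_elements, key=lambda x: x["confidence"])["color"]
--
--     # If no matching direction or circle, return the element with highest confidence
--     return max(effective_elements, key=lambda x: x["confidence"])["color"]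
-- ===== SOURCE B (Python) =====
-- def identify_current_light_status(
--     turn_direction: int, traffic_light_elements: list
-- ) -> int:
--     # One priority-keyed max instead of three filter+max passes:
--     # rank 2 = matches the turn direction's arrow, rank 1 = circle, rank 0 = rest.
--     effective = [e for e in traffic_light_elements if e["color"] != 0]
--     if not effective:
--         return 0
--     if len(effective) == 1:
--         return effective[0]["color"]
--     target_shape = {0: 4, 1: 2, 2: 3}.get(turn_direction, 0)
--
--     def rank(e):
--         s = e["shape"]
--         return 2 if s == target_shape else (1 if s == 1 else 0)
--
--     return max(effective, key=lambda e: (rank(e), e["confidence"]))["color"]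
-- ===== Notes on version B (the rewrite author's own statement) =====
-- stated objective: simpler
-- what changed: Replaces A's three separate tier filters (direction match, circle, fallback) each with its own confidence-max by a single max over the effective elements keyed lexicographically by (tier rank, confidence).
import Mathlib
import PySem

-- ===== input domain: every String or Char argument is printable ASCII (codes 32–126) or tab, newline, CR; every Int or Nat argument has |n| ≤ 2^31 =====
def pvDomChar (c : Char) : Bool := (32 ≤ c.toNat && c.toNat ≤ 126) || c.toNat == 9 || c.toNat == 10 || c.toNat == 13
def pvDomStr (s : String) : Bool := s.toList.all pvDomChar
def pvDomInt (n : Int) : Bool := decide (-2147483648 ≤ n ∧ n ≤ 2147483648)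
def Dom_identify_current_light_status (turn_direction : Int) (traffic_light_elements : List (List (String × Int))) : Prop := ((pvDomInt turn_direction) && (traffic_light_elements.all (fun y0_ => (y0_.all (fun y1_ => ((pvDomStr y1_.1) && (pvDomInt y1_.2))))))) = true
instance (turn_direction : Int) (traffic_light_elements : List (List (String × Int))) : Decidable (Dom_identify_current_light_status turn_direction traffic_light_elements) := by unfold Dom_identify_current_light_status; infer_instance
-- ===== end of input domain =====

-- B replaces A's three tier filters (direction match / circle / fallback), each with its own
-- confidence max, by one max over the effective elements keyed by (tier rank, confidence): simpler.


-- ===== PORT A =====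
-- e["key"]: first-match association-list lookup, total via default 0 — exact under Pre_ (key present)
def pvGetKey (e : List (String × Int)) (k : String) : Int := (List.lookup k e).getD 0
def pvCol (e : List (String × Int)) : Int := pvGetKey e "color"
def pvShp (e : List (String × Int)) : Int := pvGetKey e "shape"
def pvConf (e : List (String × Int)) : Int := pvGetKey e "confidence"
-- direction_to_shape_map.get(turn_direction, 0)
def pvTarget (td : Int) : Int := (PySem.Dict.ofList [((0:Int),(4:Int)),(1,2),(2,3)]).getD td 0

def identify_current_light_status (turn_direction : Int) (traffic_light_elements : List (List (String × Int))) : Int :=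
  let effective := traffic_light_elements.filter (fun e => pvCol e != 0)
  if effective.isEmpty then 0
  else if effective.length = 1 then pvCol (PySem.List.pyGetD effective 0 [])
  else
    let target := pvTarget turn_direction
    let matching := effective.filter (fun e => pvShp e == target)
    if !matching.isEmpty then
      match PySem.List.max? matching pvConf with
      | some m => pvCol m
      | none => 0            -- unreachable: matching is nonempty
    else
      let circle := effective.filter (fun e => pvShp e == 1)
      if !circle.isEmpty then
        match PySem.List.max? circle pvConf with
        | some m => pvCol m
        | none => 0          -- unreachable
      else
        match PySem.List.max? effective pvConf with
        | some m => pvCol m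
        | none => 0          -- unreachable

-- ===== PORT B =====
def pvRank (target : Int) (e : List (String × Int)) : Int :=
  if pvShp e = target then 2 else if pvShp e = 1 then 1 else 0

def identify_current_light_status_alt (turn_direction : Int) (traffic_light_elements : List (List (String × Int))) : Int :=
  let effective := traffic_light_elements.filter (fun e => pvCol e != 0)
  if effective.isEmpty then 0
  else if effective.length = 1 then pvCol (PySem.List.pyGetD effective 0 [])
  else
    let target := pvTarget turn_direction
    match PySem.List.max2? effective (pvRank target) pvConf with
    | some m => pvCol m
    | none => 0              -- unreachable: effective is nonempty

-- ===== PRECONDITION & SPEC =====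
def pvHasKey (e : List (String × Int)) (k : String) : Bool := (List.lookup k e).isSome
-- Pre_ excludes the inputs where a lookup A performs hits a missing dict key (KeyError):
-- every element needs "color", and with ≥ 2 effective elements every effective element needs
-- "shape" and "confidence". A returns only on a few such excluded inputs (a missing
-- "confidence" on an element outside the tier A selects); B raises there too or reads it.
def Pre_identify_current_light_status (turn_direction : Int) (traffic_light_elements : List (List (String × Int))) : Prop :=
  (traffic_light_elements.all (fun e => pvHasKey e "color") &&
    (let eff := traffic_light_elements.filter (fun e => pvCol e != 0)
     !decide (2 ≤ eff.length) || eff.all (fun e => pvHasKey e "shape" && pvHasKey e "confidence"))) = true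
instance (turn_direction : Int) (traffic_light_elements : List (List (String × Int))) : Decidable (Pre_identify_current_light_status turn_direction traffic_light_elements) := by unfold Pre_identify_current_light_status; infer_instance

def pvWitness_identify_current_light_status : Int × (List (List (String × Int))) :=
  (0, [[("color", 1), ("shape", 4), ("confidence", 10)], [("color", 3), ("shape", 1), ("confidence", 5)]])

def Spec_identify_current_light_status (turn_direction : Int) (traffic_light_elements : List (List (String × Int))) (out : Int) : Prop := out = identify_current_light_status_alt turn_direction traffic_light_elements
instance (turn_direction : Int) (traffic_light_elements : List (List (String × Int))) (out : Int) : Decidable (Spec_identify_current_light_status turn_direction traffic_light_elements out) := by unfold Spec_identify_current_light_status; infer_instance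

-- ===== CLAIM (what is proved, stated in full; the proofs are below) =====
def Claim_equal_identify_current_light_status : Prop := ∀ (turn_direction : Int) (traffic_light_elements : List (List (String × Int))), Dom_identify_current_light_status turn_direction traffic_light_elements → Pre_identify_current_light_status turn_direction traffic_light_elements → Spec_identify_current_light_status turn_direction traffic_light_elements (identify_current_light_status turn_direction traffic_light_elements)

-- ===== LEMMAS AND PROOFS =====

-- The two fold steps, named so the lemmas can speak about intermediate accumulators.
def pvStep1 {α : Type} (k : α → Int) (acc : Option α) (x : α) : Option α :=
  match acc with
  | none => some x
  | some m => if k m < k x then some x else some m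

def pvStep2 {α : Type} (r k : α → Int) (acc : Option α) (x : α) : Option α :=
  match acc with
  | none => some x
  | some m => if (decide (r m < r x) || (!decide (r x < r m) && decide (k m < k x))) then some x else some m

theorem pvMax?_eq_foldl {α : Type} (xs : List α) (k : α → Int) :
    PySem.List.max? xs k = xs.foldl (pvStep1 k) none := rfl

theorem pvMax2?_eq_foldl {α : Type} (xs : List α) (r k : α → Int) :
    PySem.List.max2? xs r k = xs.foldl (pvStep2 r k) none := rfl

theorem pvStep2_mem {α : Type} (r k : α → Int) (m x : α) :
    pvStep2 r k (some m) x = some x ∨ pvStep2 r k (some m) x = some m := by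
  simp only [pvStep2]; split_ifs <;> simp

-- A strictly-lower-rank prefix never survives: the first top-rank element takes over.
theorem pvFoldl2_low {α : Type} (r k : α → Int) (x : α) :
    ∀ (pre : List α) (a : α), r a < r x → (∀ e ∈ pre, r e < r x) →
      ∀ suf, (pre ++ x :: suf).foldl (pvStep2 r k) (some a) = suf.foldl (pvStep2 r k) (some x) := by
  intro pre
  induction pre with
  | nil =>
      intro a ha _ suf
      simp [pvStep2, ha]
  | cons e pre ih =>
      intro a ha hpre suf
      have he : r e < r x := hpre e (by simp)
      have hpre' : ∀ e' ∈ pre, r e' < r x := fun e' h => hpre e' (by simp [h])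
      simp only [List.cons_append, List.foldl_cons]
      rcases pvStep2_mem r k a e with hs | hs <;> rw [hs]
      · exact ih e he hpre' suf
      · exact ih a ha hpre' suf

theorem pvFoldl2_start {α : Type} (r k : α → Int) (x : α) (pre suf : List α)
    (hpre : ∀ e ∈ pre, r e < r x) :
    (pre ++ x :: suf).foldl (pvStep2 r k) none = suf.foldl (pvStep2 r k) (some x) := by
  cases pre with
  | nil => simp [pvStep2]
  | cons e pre =>
      simp only [List.cons_append, List.foldl_cons]
      rw [show pvStep2 r k none e = some e from rfl]
      exact pvFoldl2_low r k x pre e (hpre e (by simp))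
        (fun e' h => hpre e' (by simp [h])) suf

-- Once the accumulator holds a top-rank element, the lexicographic fold is the plain
-- confidence fold over the top-rank elements.
theorem pvFoldl2_top {α : Type} (r k : α → Int) (R : Int) :
    ∀ (suf : List α) (m : α), r m = R → (∀ e ∈ suf, r e ≤ R) →
      suf.foldl (pvStep2 r k) (some m) =
        (suf.filter (fun e => r e == R)).foldl (pvStep1 k) (some m) := by
  intro suf
  induction suf with
  | nil => intro m _ _; rfl
  | cons e suf ih =>
      intro m hm hle
      have he : r e ≤ R := hle e (by simp)
      have hle' : ∀ e' ∈ suf, r e' ≤ R := fun e' h => hle e' (by simp [h])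
      by_cases heq : r e = R
      · simp only [List.foldl_cons, List.filter_cons, heq, beq_self_eq_true, if_true]
        by_cases hk : k m < k e
        · have h2 : pvStep2 r k (some m) e = some e := by
            simp only [pvStep2]; rw [if_pos]; simp [hm, heq, hk]
          have h1 : pvStep1 k (some m) e = some e := by
            simp only [pvStep1]; rw [if_pos hk]
          rw [h2, h1]; exact ih e heq hle'
        · have h2 : pvStep2 r k (some m) e = some m := by
            simp only [pvStep2]; rw [if_neg]; simp [hm, heq, hk]
          have h1 : pvStep1 k (some m) e = some m := by
            simp only [pvStep1]; rw [if_neg hk]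
          rw [h2, h1]; exact ih m hm hle'
      · have hlt : r e < r m := by omega
        have h2 : pvStep2 r k (some m) e = some m := by
          simp only [pvStep2]; rw [if_neg]; simp; constructor
          · omega
          · intro h; exfalso; omega
        simp only [List.foldl_cons, List.filter_cons, h2]
        rw [show (r e == R) = false by simp [heq]]
        exact ih m hm hle'

-- The tier characterisation: if R is attained and is an upper bound of the ranks, the
-- lexicographic max is the confidence max over the rank-R elements.
theorem pvMax2?_tier {α : Type} (r k : α → Int) (xs : List α) (R : Int)
    (hex : ∃ x ∈ xs, r x = R) (hle : ∀ e ∈ xs, r e ≤ R) :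
    PySem.List.max2? xs r k = PySem.List.max? (xs.filter (fun e => r e == R)) k := by
  set p : α → Bool := fun e => r e == R with hp
  have hdecomp : xs.takeWhile (fun e => !p e) ++ xs.dropWhile (fun e => !p e) = xs :=
    List.takeWhile_append_dropWhile
  obtain ⟨x0, hx0, hx0R⟩ := hex
  have hdropne : xs.dropWhile (fun e => !p e) ≠ [] := by
    intro hnil
    have := List.dropWhile_eq_nil_iff.mp hnil x0 hx0
    simp [hp, hx0R] at this
  obtain ⟨x, suf, hxs⟩ := List.exists_cons_of_ne_nil hdropne
  have hx : p x = true := by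
    have h := List.head?_dropWhile_not (fun e => !p e) xs
    rw [hxs] at h
    simpa using h
  have hxR : r x = R := by simpa [hp] using hx
  have hpre : ∀ e ∈ xs.takeWhile (fun e => !p e), r e < R := by
    intro e he
    have hne : p e = false := by
      have h := List.mem_takeWhile_imp he
      simpa using h
    have h1 : r e ≠ R := by simpa [hp] using hne
    have h2 : r e ≤ R := hle e (by rw [← hdecomp]; exact List.mem_append_left _ he)
    omega
  have hsuf : ∀ e ∈ suf, r e ≤ R := by
    intro e he
    apply hle
    rw [← hdecomp, hxs]
    exact List.mem_append_right _ (by simp [he])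
  rw [pvMax2?_eq_foldl]
  conv_lhs => rw [← hdecomp, hxs]
  rw [pvFoldl2_start r k x _ suf (by intro e he; rw [hxR]; exact hpre e he)]
  rw [pvFoldl2_top r k R suf x hxR hsuf]
  rw [pvMax?_eq_foldl]
  conv_rhs => rw [← hdecomp, hxs]
  rw [List.filter_append]
  have hpref : (xs.takeWhile (fun e => !p e)).filter p = [] := by
    apply List.filter_eq_nil_iff.mpr
    intro e he
    have h := hpre e he
    simp [hp]; omega
  rw [hpref]
  simp only [List.nil_append, List.filter_cons, hx, if_true, List.foldl_cons]
  rw [hp, show pvStep1 k none x = some x from rfl]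

theorem identify_spec_aux (turn_direction : Int) (traffic_light_elements : List (List (String × Int))) :
    identify_current_light_status turn_direction traffic_light_elements
      = identify_current_light_status_alt turn_direction traffic_light_elements := by
  unfold identify_current_light_status identify_current_light_status_alt
  set eff := traffic_light_elements.filter (fun e => pvCol e != 0) with heff
  by_cases h0 : eff.isEmpty
  · simp [h0]
  · by_cases h1 : eff.length = 1
    · simp [h0, h1]
    · simp only [h0, h1, if_false, Bool.false_eq_true]
      set t := pvTarget turn_direction with ht
      set r := pvRank t with hr
      have hrle : ∀ e, r e ≤ 2 := by
        intro e; simp only [hr, pvRank]; split_ifs <;> omega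
      have hr2 : ∀ e, r e = 2 ↔ pvShp e = t := by
        intro e; simp only [hr, pvRank]; split_ifs with a <;> simp_all
      have hne : eff ≠ [] := by simpa [List.isEmpty_iff] using h0
      by_cases hm : (eff.filter (fun e => pvShp e == t)).isEmpty
      · -- no direction match: every effective rank is ≤ 1
        have hnomatch : ∀ e ∈ eff, pvShp e ≠ t := by
          intro e he hc
          have hmem : e ∈ eff.filter (fun e => pvShp e == t) :=
            List.mem_filter.mpr ⟨he, by simp [hc]⟩
          simp only [List.isEmpty_iff] at hm
          rw [hm] at hmem; simp at hmem
        have hr1 : ∀ e ∈ eff, r e = if pvShp e = 1 then 1 else 0 := by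
          intro e he
          have hnm := hnomatch e he
          simp only [hr, pvRank, if_neg hnm]
        have hrle1 : ∀ e ∈ eff, r e ≤ 1 := by
          intro e he; rw [hr1 e he]; split_ifs <;> omega
        by_cases hc : (eff.filter (fun e => pvShp e == 1)).isEmpty
        · -- fallback tier: all ranks 0
          have hall0 : ∀ e ∈ eff, r e = 0 := by
            intro e he
            have hnc : pvShp e ≠ 1 := by
              intro hce
              have hmem : e ∈ eff.filter (fun e => pvShp e == 1) :=
                List.mem_filter.mpr ⟨he, by simp [hce]⟩
              simp only [List.isEmpty_iff] at hc
              rw [hc] at hmem; simp at hmem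
            rw [hr1 e he, if_neg hnc]
          simp only [hm, hc, Bool.not_true, Bool.false_eq_true, if_false]
          rw [pvMax2?_tier r pvConf eff 0
            (by obtain ⟨x, hx⟩ := List.exists_mem_of_ne_nil eff hne; exact ⟨x, hx, hall0 x hx⟩)
            (by intro e he; rw [hall0 e he])]
          have hself : eff.filter (fun e => r e == 0) = eff :=
            List.filter_eq_self.mpr (fun e he => by simp [hall0 e he])
          rw [hself]
        · -- circle tier
          have hcirc : eff.filter (fun e => pvShp e == 1) ≠ [] := by
            simpa [List.isEmpty_iff] using hc
          obtain ⟨x, hx⟩ := List.exists_mem_of_ne_nil _ hcirc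
          have hxmem := (List.mem_filter.mp hx).1
          have hxsh : pvShp x = 1 := by
            have h := (List.mem_filter.mp hx).2; simpa using h
          have hc' : (eff.filter (fun e => pvShp e == 1)).isEmpty = false := by
            simpa using hc
          simp only [hm, hc', Bool.not_true, Bool.not_false, Bool.false_eq_true, if_false, if_true]
          rw [pvMax2?_tier r pvConf eff 1
            ⟨x, hxmem, by rw [hr1 x hxmem, if_pos hxsh]⟩ hrle1]
          have hfe : eff.filter (fun e => r e == 1) = eff.filter (fun e => pvShp e == 1) :=
            List.filter_congr (fun e he => by rw [hr1 e he]; split_ifs with hs <;> simp [hs])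
          rw [hfe]
      · -- direction-match tier
        have hmatch : eff.filter (fun e => pvShp e == t) ≠ [] := by
          simpa [List.isEmpty_iff] using hm
        obtain ⟨x, hx⟩ := List.exists_mem_of_ne_nil _ hmatch
        have hxmem := (List.mem_filter.mp hx).1
        have hxsh : pvShp x = t := by
          have h := (List.mem_filter.mp hx).2; simpa using h
        have hm' : (eff.filter (fun e => pvShp e == t)).isEmpty = false := by
          simpa using hm
        simp only [hm', Bool.not_false, if_true]
        rw [pvMax2?_tier r pvConf eff 2
          ⟨x, hxmem, (hr2 x).mpr hxsh⟩ (fun e _ => hrle e)]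
        have hfe : eff.filter (fun e => r e == 2) = eff.filter (fun e => pvShp e == t) :=
          List.filter_congr (fun e _ => by
            have h2 := hr2 e
            by_cases hs : pvShp e = t <;> simp [hs, h2])
        rw [hfe]

-- ===== VERDICT (by name: the statement is the Claim_ definition above) =====
theorem identify_current_light_status_spec : Claim_equal_identify_current_light_status := by
  intro td L _ _
  unfold Spec_identify_current_light_status
  exact identify_spec_aux td L
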